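-- pv_equiv track=rewrite | github.com/Revi1337/BaekJoon-Coding-Test | 백준/Silver/14490. 백대열/백대열.py | solution
-- ===== SOURCE A (Python) =====
-- def solution(string):
--
--     def gcd(num1, num2):
--         min_num, max_num = min(num1, num2), max(num1, num2)
--         while max_num % min_num > 0:
--             max_num, min_num = min_num, max_num % min_num
--         return min_num
--
--     integer = gcd(string[0], string[1])
--     return f'{string[0] // integer}:{string[1] // integer}'
-- ===== SOURCE B (Python) =====
-- def solution(string):
--
--     def g(a, b):
--         lo, hi = min(a, b), max(a, b)
--         r = hi % lo
--         return g(lo, r) if r > 0 else lo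
--
--     d = g(string[0], string[1])
--     return f'{string[0] // d}:{string[1] // d}'
-- ===== Notes on version B (the rewrite author's own statement) =====
-- stated objective: alternative
-- what changed: The iterative while-loop gcd with explicit (min_num, max_num) state rebinding is replaced by a recursive helper g(a,b) that recomputes min/max and recurses on (lo, hi % lo), eliminating the mutable loop state.
import Mathlib
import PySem

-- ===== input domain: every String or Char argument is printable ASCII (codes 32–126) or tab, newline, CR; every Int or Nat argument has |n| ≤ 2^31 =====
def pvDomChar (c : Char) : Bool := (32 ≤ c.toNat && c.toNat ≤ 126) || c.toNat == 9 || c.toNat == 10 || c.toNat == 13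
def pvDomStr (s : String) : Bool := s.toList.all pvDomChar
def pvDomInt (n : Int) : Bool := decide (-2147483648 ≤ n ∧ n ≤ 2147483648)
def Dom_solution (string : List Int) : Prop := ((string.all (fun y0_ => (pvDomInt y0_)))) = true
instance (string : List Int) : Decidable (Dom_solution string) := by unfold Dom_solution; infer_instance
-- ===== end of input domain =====

-- B replaces A's mutable while-loop gcd by a recursive helper (same min/max-then-mod control
-- flow, no mutable state); objective: alternative decomposition. Equal return values on Pre_.

-- ===== PORT A =====
-- A's while loop: state (max_num, min_num); 'mn ≠ 0' is a totality guard only — Python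
-- raises ZeroDivisionError there (excluded by Pre_solution).
def gcdLoopA (mx mn : Int) : Int :=
  if h : mn ≠ 0 ∧ 0 < PySem.Int.mod mx mn then gcdLoopA mn (PySem.Int.mod mx mn) else mn
termination_by mn.natAbs
decreasing_by
  have hpos : 0 < mn := by
    rcases lt_trichotomy mn 0 with hlt | he | hgt
    · have := (PySem.Int.mod_neg_bounds mx hlt).2; omega
    · exact absurd he h.1
    · exact hgt
  have h1 := PySem.Int.mod_nonneg mx hpos
  have h2 := PySem.Int.mod_lt mx hpos
  omega

def solution (string : List Int) : String :=
  match PySem.List.pyGet? string 0, PySem.List.pyGet? string 1 with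
  | some a, some b =>
      let integer := gcdLoopA (max a b) (min a b)
      PySem.Int.toStr (PySem.Int.floordiv a integer) ++ ":" ++
        PySem.Int.toStr (PySem.Int.floordiv b integer)
  | _, _ => ""   -- IndexError in Python (excluded by Pre_solution)

-- ===== PORT B =====
-- B's recursive g(a, b): lo, hi = min, max; r = hi % lo; recurse on (lo, r) while r > 0.
-- 'lo ≠ 0' is a totality guard only — Python raises ZeroDivisionError there (outside Pre_solution).
def gRecB (a b : Int) : Int :=
  -- lo = min a b, hi = max a b, r = hi % lo (inlined)
  if h : min a b ≠ 0 ∧ 0 < PySem.Int.mod (max a b) (min a b) then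
    gRecB (min a b) (PySem.Int.mod (max a b) (min a b))
  else min a b
termination_by (min a b).natAbs
decreasing_by
  have hpos : 0 < min a b := by
    rcases lt_trichotomy (min a b) 0 with hlt | he | hgt
    · have := (PySem.Int.mod_neg_bounds (max a b) hlt).2; omega
    · exact absurd he h.1
    · exact hgt
  have h1 := PySem.Int.mod_nonneg (max a b) hpos
  have h2 := PySem.Int.mod_lt (max a b) hpos
  have : min (min a b) (PySem.Int.mod (max a b) (min a b)) = PySem.Int.mod (max a b) (min a b) := by omega
  rw [this]; omega

def solution_alt (string : List Int) : String :=
  match PySem.List.pyGet? string 0 with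
  | none => ""   -- IndexError in Python (outside Pre_solution)
  | some a =>
    match PySem.List.pyGet? string 1 with
    | none => ""   -- IndexError in Python (outside Pre_solution)
    | some b =>
      let d := gRecB a b
      PySem.Int.toStr (PySem.Int.floordiv a d) ++ ":" ++
        PySem.Int.toStr (PySem.Int.floordiv b d)

-- ===== PRECONDITION & SPEC =====
-- Pre_ excludes exactly the inputs where A raises: fewer than two elements (IndexError) and
-- min(string[0], string[1]) = 0 (ZeroDivisionError on the first '%'); A returns on all other inputs.
def Pre_solution (string : List Int) : Prop :=
  2 ≤ string.length ∧ min (string.getD 0 0) (string.getD 1 0) ≠ 0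
instance (string : List Int) : Decidable (Pre_solution string) := by unfold Pre_solution; infer_instance

def pvWitness_solution : List Int := [12, 18]

def Spec_solution (string : List Int) (out : String) : Prop := out = solution_alt string
instance (string : List Int) (out : String) : Decidable (Spec_solution string out) := by unfold Spec_solution; infer_instance

-- ===== CLAIM (what is proved, stated in full; the proofs are below) =====
def Claim_equal_solution : Prop := ∀ (string : List Int), Dom_solution string → Pre_solution string → Spec_solution string (solution string)

-- ===== LEMMAS AND PROOFS =====

theorem gRecB_eq (n : Nat) : ∀ a b : Int, (min a b).natAbs = n →
    gRecB a b = gcdLoopA (max a b) (min a b) := by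
  induction n using Nat.strong_induction_on with
  | _ n ih =>
    intro a b hn
    rw [gRecB, gcdLoopA]
    by_cases h : min a b ≠ 0 ∧ 0 < PySem.Int.mod (max a b) (min a b)
    · rw [dif_pos h, dif_pos h]
      have hpos : 0 < min a b := by
        rcases lt_trichotomy (min a b) 0 with hlt | he | hgt
        · have := (PySem.Int.mod_neg_bounds (max a b) hlt).2; omega
        · exact absurd he h.1
        · exact hgt
      set r := PySem.Int.mod (max a b) (min a b) with hr
      have h1 : 0 ≤ r := PySem.Int.mod_nonneg (max a b) hpos
      have h2 : r < min a b := PySem.Int.mod_lt (max a b) hpos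
      have hmin : min (min a b) r = r := by omega
      have hmax : max (min a b) r = min a b := by omega
      have := ih r.natAbs (by omega) (min a b) r (by rw [hmin])
      rw [this, hmin, hmax]
    · rw [dif_neg h, dif_neg h]

theorem solution_spec : Claim_equal_solution := by
  intro string _ _
  unfold Spec_solution solution solution_alt
  cases h0 : PySem.List.pyGet? string 0 with
  | none => cases h1 : PySem.List.pyGet? string 1 <;> rfl
  | some a =>
    cases h1 : PySem.List.pyGet? string 1 with
    | none => rfl
    | some b =>
      simp only []
      rw [gRecB_eq (min a b).natAbs a b rfl]
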